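-- pv_equiv track=rewrite | github.com/RPO-WW/Python_tasks | block11/task168.py | insert_between_same_sign
-- ===== SOURCE A (Python) =====
-- from typing import List
--
-- def insert_between_same_sign(arr: List[int], n: int) -> List[int]:
--     if not isinstance(arr, list):
--         raise TypeError('arr must be a list')
--
--     result: List[int] = []
--     for i, value in enumerate(arr):
--         result.append(value)
--         if i + 1 < len(arr) and value != 0 and arr[i + 1] != 0 and value * arr[i + 1] > 0:
--             result.append(n)
--     return result
-- ===== SOURCE B (Python) =====
-- from typing import List
--
-- def insert_between_same_sign(arr: List[int], n: int) -> List[int]: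
--     if not isinstance(arr, list):
--         raise TypeError('arr must be a list')
--
--     def sign(x: int) -> int:
--         return (x > 0) - (x < 0)
--
--     result: List[int] = []
--     i = 0
--     while i < len(arr):
--         s = sign(arr[i])
--         j = i + 1
--         while j < len(arr) and sign(arr[j]) == s:
--             j += 1
--         run = arr[i:j]
--         if s != 0:
--             out = run[:1]
--             for v in run[1:]:
--                 out.extend([n, v])
--             result.extend(out)
--         else:
--             result.extend(run)
--         i = j
--     return result
-- ===== Notes on version B (the rewrite author's own statement) =====
-- stated objective: alternative
-- what changed: B splits the list into maximal runs of equal sign and intersperses n inside each nonzero-sign run, instead of A's single indexed pass that looks ahead at arr[i+1] for every element.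
import Mathlib
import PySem

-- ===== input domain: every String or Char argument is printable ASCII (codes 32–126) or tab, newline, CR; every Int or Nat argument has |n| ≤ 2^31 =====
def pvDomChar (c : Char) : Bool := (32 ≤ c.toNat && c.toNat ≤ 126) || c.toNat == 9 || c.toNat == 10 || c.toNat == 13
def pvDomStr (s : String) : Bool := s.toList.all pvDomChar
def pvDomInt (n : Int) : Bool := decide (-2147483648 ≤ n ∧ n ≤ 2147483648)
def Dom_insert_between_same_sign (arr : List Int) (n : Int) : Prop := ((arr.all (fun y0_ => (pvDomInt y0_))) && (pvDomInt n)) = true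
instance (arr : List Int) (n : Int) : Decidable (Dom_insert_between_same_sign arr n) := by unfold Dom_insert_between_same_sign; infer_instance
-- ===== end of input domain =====

-- B builds the output run-by-run instead of A's indexed look-ahead pass; alternative decomposition, same cost.

-- ===== PORT A =====
-- literal port of A's loop: for i, value in enumerate(arr): append value; look ahead at arr[i+1]
def insert_between_same_sign (arr : List Int) (n : Int) : List Int :=
  (PySem.List.enumerate arr).foldl
    (fun result iv =>
      let result := result ++ [iv.2]
      if iv.1 + 1 < PySem.List.len arr ∧ iv.2 ≠ 0 ∧ PySem.List.pyGetD arr (iv.1 + 1) 0 ≠ 0 ∧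
          iv.2 * PySem.List.pyGetD arr (iv.1 + 1) 0 > 0 then
        result ++ [n]
      else result)
    []

-- ===== PORT B =====
-- sign(x) = (x > 0) - (x < 0)
def signI (x : Int) : Int := (if 0 < x then (1 : Int) else 0) - (if x < 0 then 1 else 0)

-- the inner while loop: take the maximal prefix of sign s (= run tail), return (run-tail, rest)
def runSplit (s : Int) : List Int → List Int × List Int
  | [] => ([], [])
  | y :: t =>
    if signI y = s then
      let p := runSplit s t
      (y :: p.1, p.2)
    else ([], y :: t)

lemma runSplit_snd_length (s : Int) (t : List Int) : (runSplit s t).2.length ≤ t.length := by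
  induction t with
  | nil => simp [runSplit]
  | cons y t ih =>
    simp only [runSplit]
    split
    · simpa using Nat.le_succ_of_le ih
    · simp

-- out = run[:1]; for v in run[1:]: out.extend([n, v])
def runOut (n : Int) : List Int → List Int
  | [] => []
  | x :: t => x :: t.flatMap (fun v => [n, v])

-- the outer while loop over runs
def bGo (n : Int) : List Int → List Int
  | [] => []
  | x :: t =>
    let p := runSplit (signI x) t
    (if signI x ≠ 0 then runOut n (x :: p.1) else x :: p.1) ++ bGo n p.2
termination_by ys => ys.length
decreasing_by
  simpa using Nat.lt_succ_of_le (runSplit_snd_length (signI x) t)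

def insert_between_same_sign_alt (arr : List Int) (n : Int) : List Int := bGo n arr

-- ===== PRECONDITION & SPEC =====
def Spec_insert_between_same_sign (arr : List Int) (n : Int) (out : List Int) : Prop := out = insert_between_same_sign_alt arr n
instance (arr : List Int) (n : Int) (out : List Int) : Decidable (Spec_insert_between_same_sign arr n out) := by unfold Spec_insert_between_same_sign; infer_instance

-- ===== CLAIM (what is proved, stated in full; the proofs are below) =====
def Claim_equal_insert_between_same_sign : Prop := ∀ (arr : List Int) (n : Int), Dom_insert_between_same_sign arr n → Spec_insert_between_same_sign arr n (insert_between_same_sign arr n)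

-- ===== LEMMAS AND PROOFS =====

-- canonical pairwise form both ports are reduced to
def canon (n : Int) : List Int → List Int
  | [] => []
  | [x] => [x]
  | x :: y :: t => x :: ((if x ≠ 0 ∧ y ≠ 0 ∧ x * y > 0 then [n] else []) ++ canon n (y :: t))

lemma cond_iff_sign (x y : Int) :
    (x ≠ 0 ∧ y ≠ 0 ∧ x * y > 0) ↔ (signI x = signI y ∧ signI x ≠ 0) := by
  simp only [signI, gt_iff_lt, mul_pos_iff]
  split_ifs <;> omega

-- A's foldl over the enumerated suffix computes canon of the suffix
lemma A_aux (arr : List Int) (n : Int) : ∀ (ys : List Int) (k : Nat) (acc : List Int),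
    arr.drop k = ys →
    (PySem.List.enumerate ys (k : Int)).foldl
      (fun result iv =>
        let result := result ++ [iv.2]
        if iv.1 + 1 < PySem.List.len arr ∧ iv.2 ≠ 0 ∧ PySem.List.pyGetD arr (iv.1 + 1) 0 ≠ 0 ∧
            iv.2 * PySem.List.pyGetD arr (iv.1 + 1) 0 > 0 then
          result ++ [n]
        else result)
      acc = acc ++ canon n ys := by
  intro ys
  induction ys with
  | nil => intro k acc _; simp [PySem.List.enumerate_nil, canon]
  | cons x t ih =>
    intro k acc hdrop
    have hk : k < arr.length := by
      by_contra h
      simp [List.drop_eq_nil_of_le (Nat.le_of_not_lt h)] at hdrop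
    have hdrop' : arr.drop (k + 1) = t := by
      have : arr.drop (k + 1) = (arr.drop k).drop 1 := by
        rw [List.drop_drop]
      simp [this, hdrop]
    rw [PySem.List.enumerate_cons, List.foldl_cons]
    cases t with
    | nil =>
      have hlen : k + 1 = arr.length := by
        have h1 : arr.length - (k+1) = 0 := by
          have := congrArg List.length hdrop'
          simpa using this
        omega
      have hcond : ¬ ((k : Int) + 1 < PySem.List.len arr ∧ x ≠ 0 ∧
          PySem.List.pyGetD arr ((k : Int) + 1) 0 ≠ 0 ∧
          x * PySem.List.pyGetD arr ((k : Int) + 1) 0 > 0) := by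
        intro ⟨h1, _⟩
        rw [PySem.List.len_eq] at h1
        omega
      simp only [hcond, if_neg, not_false_iff]
      have := ih (k + 1) (acc ++ [x]) hdrop'
      simp only [PySem.List.enumerate_nil, List.foldl_nil] at this ⊢
      simp [canon]
    | cons y t' =>
      have hget : PySem.List.pyGetD arr ((k : Int) + 1) 0 = y := by
        have hcast : ((k : Int) + 1) = ((k + 1 : Nat) : Int) := by push_cast; ring
        rw [hcast, PySem.List.pyGetD_natCast]
        have : arr[k+1]? = some y := by
          rw [← List.head?_drop, hdrop']; rfl
        simp [List.getD, this]
      have hklen : (k : Int) + 1 < PySem.List.len arr := by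
        rw [PySem.List.len_eq]
        have : k + 1 < arr.length := by
          have := congrArg List.length hdrop'
          simp at this
          omega
        exact_mod_cast this
      have hcond : ((k : Int) + 1 < PySem.List.len arr ∧ x ≠ 0 ∧
          PySem.List.pyGetD arr ((k : Int) + 1) 0 ≠ 0 ∧
          x * PySem.List.pyGetD arr ((k : Int) + 1) 0 > 0) ↔ (x ≠ 0 ∧ y ≠ 0 ∧ x * y > 0) := by
        rw [hget]
        constructor
        · rintro ⟨_, a, b, c⟩; exact ⟨a, b, c⟩
        · rintro ⟨a, b, c⟩; exact ⟨hklen, a, b, c⟩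
      have hcast : ((k : Int) + 1) = ((k + 1 : Nat) : Int) := by push_cast; ring
      have ihres := ih (k + 1) (if x ≠ 0 ∧ y ≠ 0 ∧ x * y > 0 then acc ++ [x] ++ [n] else acc ++ [x]) hdrop'
      dsimp only
      simp only [hcond]
      rw [hcast, ihres]
      by_cases h : x ≠ 0 ∧ y ≠ 0 ∧ x * y > 0
      · simp [canon, if_pos h]
      · simp [canon, if_neg h]

lemma A_eq_canon (arr : List Int) (n : Int) : insert_between_same_sign arr n = canon n arr := by
  have := A_aux arr n arr 0 [] (by simp)
  simpa [insert_between_same_sign] using this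

-- runSplit returns a decomposition: same-sign run tail, rest with a different-sign head
lemma runSplit_spec (s : Int) (t : List Int) :
    t = (runSplit s t).1 ++ (runSplit s t).2 ∧
    (∀ y ∈ (runSplit s t).1, signI y = s) ∧
    (∀ z, (runSplit s t).2.head? = some z → signI z ≠ s) := by
  induction t with
  | nil => simp [runSplit]
  | cons y t ih =>
    by_cases h : signI y = s
    · simp only [runSplit, if_pos h]
      refine ⟨by simpa using ih.1, ?_, ih.2.2⟩
      intro z hz
      rcases List.mem_cons.mp hz with rfl | hz
      · exact h
      · exact ih.2.1 z hz
    · simp only [runSplit, if_neg h]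
      exact ⟨rfl, by simp, by simpa using h⟩

-- canon on a same-sign run followed by a differently-signed rest
lemma canon_run (n : Int) : ∀ (r : List Int) (x : Int) (rest : List Int),
    (∀ y ∈ r, signI y = signI x) →
    (∀ z, rest.head? = some z → signI z ≠ signI x) →
    canon n (x :: (r ++ rest)) =
      (if signI x ≠ 0 then runOut n (x :: r) else x :: r) ++ canon n rest := by
  intro r
  induction r with
  | nil =>
    intro x rest _ hrest
    cases rest with
    | nil => simp [canon, runOut]
    | cons z zs =>
      have hz : signI z ≠ signI x := hrest z rfl
      have hcond : ¬ (x ≠ 0 ∧ z ≠ 0 ∧ x * z > 0) := by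
        intro hc
        exact hz ((cond_iff_sign x z).mp hc).1.symm
      simp [canon, if_neg hcond, runOut]
  | cons y r' ih =>
    intro x rest hr hrest
    have hy : signI y = signI x := hr y (by simp)
    have ihres := ih y rest (fun w hw => (hr w (by simp [hw])).trans hy.symm)
      (fun z hz => fun he => hrest z hz (he.trans hy))
    have hcons : x :: (y :: r' ++ rest) = x :: y :: (r' ++ rest) := rfl
    by_cases hs : signI x ≠ 0
    · have hcond : x ≠ 0 ∧ y ≠ 0 ∧ x * y > 0 :=
        (cond_iff_sign x y).mpr ⟨hy.symm, hs⟩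
      have hys : signI y ≠ 0 := by rw [hy]; exact hs
      simp only [List.cons_append, canon, if_pos hcond]
      rw [ihres]
      simp [if_pos hys, if_pos hs, runOut]
    · have hcond : ¬ (x ≠ 0 ∧ y ≠ 0 ∧ x * y > 0) := by
        intro hc
        exact hs ((cond_iff_sign x y).mp hc).2
      have hys : ¬ signI y ≠ 0 := by rw [hy]; exact hs
      simp only [List.cons_append, canon, if_neg hcond]
      rw [ihres]
      simp [if_neg hys, if_neg hs]

lemma bGo_eq_canon (n : Int) : ∀ (ys : List Int), bGo n ys = canon n ys := by
  suffices h : ∀ (m : Nat) (ys : List Int), ys.length ≤ m → bGo n ys = canon n ys from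
    fun ys => h ys.length ys le_rfl
  intro m
  induction m with
  | zero =>
    intro ys hlen
    rw [List.length_eq_zero_iff.mp (Nat.le_zero.mp hlen)]
    simp [bGo, canon]
  | succ m ih =>
    intro ys hlen
    cases ys with
    | nil => simp [bGo, canon]
    | cons x t =>
      obtain ⟨hsplit, hrun, hrest⟩ := runSplit_spec (signI x) t
      have hsub : (runSplit (signI x) t).2.length ≤ m := by
        have h1 := runSplit_snd_length (signI x) t
        simp at hlen
        omega
      rw [bGo, ih _ hsub]
      conv_rhs => rw [show x :: t = x :: ((runSplit (signI x) t).1 ++ (runSplit (signI x) t).2) from by rw [← hsplit]]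
      rw [canon_run n _ x _ hrun hrest]

-- ===== VERDICT (by name: the statement is the Claim_ definition above) =====
theorem insert_between_same_sign_spec : Claim_equal_insert_between_same_sign := by
  intro arr n _
  unfold Spec_insert_between_same_sign insert_between_same_sign_alt
  rw [A_eq_canon, bGo_eq_canon]
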